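-- pv_equiv track=rewrite | github.com/ScriptXDemon/blockvault-hari | apps/api/src/blockvault_api/zkpt_witness.py | normalize_policy_terms
-- ===== SOURCE A (Python) =====
-- def normalize_policy_terms(policy_terms: list[str]) -> list[str]:
--     normalized: list[str] = []
--     seen: set[str] = set()
--     for term in policy_terms:
--         cleaned = str(term or "").strip().lower()
--         if not cleaned or cleaned in seen:
--             continue
--         seen.add(cleaned)
--         normalized.append(cleaned)
--     return sorted(normalized)
-- ===== SOURCE B (Python) =====
-- def normalize_policy_terms(policy_terms: list[str]) -> list[str]:
--     cleaned = [str(t or "").strip().lower() for t in policy_terms]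
--     cleaned = [c for c in cleaned if c]
--     cleaned.sort()
--     out: list[str] = []
--     for c in cleaned:
--         if not out or out[-1] != c:
--             out.append(c)
--     return out
-- ===== Notes on version B (the rewrite author's own statement) =====
-- stated objective: alternative
-- what changed: B drops the 'seen' hash set entirely: it cleans all terms, sorts the cleaned non-empty ones first, and deduplicates in a single pass over the sorted list by comparing each element with the previously kept one (adjacency dedup), whereas A dedups in input order with a set and sorts afterwards.
import Mathlib
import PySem

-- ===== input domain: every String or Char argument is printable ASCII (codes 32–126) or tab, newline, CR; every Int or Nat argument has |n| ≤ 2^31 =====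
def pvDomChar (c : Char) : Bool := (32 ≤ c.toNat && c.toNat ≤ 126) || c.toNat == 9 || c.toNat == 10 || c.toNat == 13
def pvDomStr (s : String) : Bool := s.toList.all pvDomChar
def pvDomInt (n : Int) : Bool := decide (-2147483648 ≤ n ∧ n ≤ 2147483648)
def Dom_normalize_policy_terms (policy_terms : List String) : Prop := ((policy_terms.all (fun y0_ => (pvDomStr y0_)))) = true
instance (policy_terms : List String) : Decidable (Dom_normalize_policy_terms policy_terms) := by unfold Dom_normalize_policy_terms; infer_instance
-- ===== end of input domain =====

-- B removes A's 'seen' set: it sorts the cleaned non-empty terms first and deduplicates by adjacency in one pass.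


-- ===== PORT A =====
def normalize_policy_terms (policy_terms : List String) : List String :=
  let st := policy_terms.foldl
    (fun (st : List String × PySem.Set String) term =>
      let cleaned := PySem.Str.lower (PySem.Str.strip term)
      if cleaned = "" ∨ PySem.Set.contains st.2 cleaned then st
      else (st.1 ++ [cleaned], PySem.Set.add st.2 cleaned))
    ([], PySem.Set.empty)
  PySem.List.sorted st.1 (fun x => x) false

-- ===== PORT B =====
def normalize_policy_terms_alt (policy_terms : List String) : List String :=
  let cleaned := (policy_terms.map (fun t => PySem.Str.lower (PySem.Str.strip t))).filter
      (fun c => c ≠ "")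
  (PySem.List.sorted cleaned (fun x => x) false).foldl
    (fun out c => if out = [] ∨ out.getLast? ≠ some c then out ++ [c] else out) []

-- ===== PRECONDITION & SPEC =====
def Spec_normalize_policy_terms (policy_terms : List String) (out : List String) : Prop := out = normalize_policy_terms_alt policy_terms
instance (policy_terms : List String) (out : List String) : Decidable (Spec_normalize_policy_terms policy_terms out) := by unfold Spec_normalize_policy_terms; infer_instance

-- ===== CLAIM (what is proved, stated in full; the proofs are below) =====
def Claim_equal_normalize_policy_terms : Prop := ∀ (policy_terms : List String), Dom_normalize_policy_terms policy_terms → Spec_normalize_policy_terms policy_terms (normalize_policy_terms policy_terms)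

-- ===== LEMMAS AND PROOFS =====

-- the cleaned, non-empty terms, in input order (shared vocabulary of the two proofs)
def pvCleanList (policy_terms : List String) : List String :=
  (policy_terms.map (fun t => PySem.Str.lower (PySem.Str.strip t))).filter (fun c => c ≠ "")

-- A's loop keeps 'seen' equal to 'normalized', and acts as Set.add on the cleaned non-empty terms
lemma A_fold_eq (ts : List String) : ∀ (acc : List String),
    ts.foldl
      (fun (st : List String × PySem.Set String) term =>
        let cleaned := PySem.Str.lower (PySem.Str.strip term)
        if cleaned = "" ∨ PySem.Set.contains st.2 cleaned then st
        else (st.1 ++ [cleaned], PySem.Set.add st.2 cleaned))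
      (acc, acc)
    = ((pvCleanList ts).foldl PySem.Set.add acc, (pvCleanList ts).foldl PySem.Set.add acc) := by
  induction ts with
  | nil => intro acc; simp [pvCleanList]
  | cons t ts ih =>
    intro acc
    by_cases hc : PySem.Str.lower (PySem.Str.strip t) = ""
    · simp only [pvCleanList, List.foldl_cons, List.map_cons, List.filter_cons] at *
      simpa [hc] using ih acc
    · simp only [List.foldl_cons, pvCleanList, List.map_cons, List.filter_cons]
      by_cases hm : PySem.Str.lower (PySem.Str.strip t) ∈ acc
      · simpa [pvCleanList, hc, hm, PySem.Set.add, PySem.Set.contains] using ih acc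
      · simpa [pvCleanList, hc, hm, PySem.Set.add, PySem.Set.contains] using
          ih (acc ++ [PySem.Str.lower (PySem.Str.strip t)])

lemma A_eq_sorted_ofList (policy_terms : List String) :
    normalize_policy_terms policy_terms
      = PySem.List.sorted (PySem.Set.ofList (pvCleanList policy_terms)) (fun x => x) false := by
  unfold normalize_policy_terms
  rw [show (([], PySem.Set.empty) : List String × PySem.Set String) = (([] : List String), ([] : List String)) from rfl,
      A_fold_eq]
  rw [PySem.Set.ofList_eq_foldl]

-- in a strictly increasing list, every member is ≤ the last element
lemma mem_le_getLast {l : List String} {a m : String}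
    (hp : l.Pairwise (· < ·)) (ha : a ∈ l) (hm : l.getLast? = some m) : a ≤ m := by
  induction l with
  | nil => cases ha
  | cons x xs ih =>
    cases xs with
    | nil =>
      simp at ha hm; simp [ha, hm]
    | cons y ys =>
      rw [List.getLast?_cons_cons] at hm
      rcases List.mem_cons.mp ha with rfl | ha'
      · have hmem : m ∈ y :: ys := List.mem_of_getLast? hm
        have := (List.pairwise_cons.mp hp).1 m hmem
        exact le_of_lt this
      · exact ih (List.pairwise_cons.mp hp).2 ha' hm

-- the adjacency-dedup loop: result is strictly increasing with members acc ∪ s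
lemma dedup_loop_spec (s : List String) : ∀ (acc : List String),
    s.Pairwise (· ≤ ·) → acc.Pairwise (· < ·) →
    (∀ m, acc.getLast? = some m → ∀ b ∈ s, m ≤ b) →
    (s.foldl (fun out c => if out = [] ∨ out.getLast? ≠ some c then out ++ [c] else out) acc).Pairwise (· < ·)
    ∧ (∀ x, x ∈ s.foldl (fun out c => if out = [] ∨ out.getLast? ≠ some c then out ++ [c] else out) acc
          ↔ x ∈ acc ∨ x ∈ s) := by
  induction s with
  | nil => intro acc _ hacc _; simpa using hacc
  | cons c t ih =>
    intro acc hs hacc hlast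
    have hs' := List.pairwise_cons.mp hs
    simp only [List.foldl_cons]
    by_cases hcond : acc = [] ∨ acc.getLast? ≠ some c
    · rw [if_pos hcond]
      have hlt : ∀ a ∈ acc, a < c := by
        intro a ha
        rcases hcond with h0 | hne
        · subst h0; cases ha
        · have hne' : acc ≠ [] := by rintro rfl; cases ha
          obtain ⟨m, hm⟩ : ∃ m, acc.getLast? = some m := by
            cases h : acc.getLast? with
            | none => exact absurd (List.getLast?_eq_none_iff.mp h) hne'
            | some m => exact ⟨m, rfl⟩
          have ham : a ≤ m := mem_le_getLast hacc ha hm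
          have hmc : m ≤ c := hlast m hm c (List.mem_cons_self ..)
          have hmne : m ≠ c := by intro h; exact hne (hm.trans (by rw [h]))
          exact lt_of_le_of_lt ham (lt_of_le_of_ne hmc hmne)
      have hacc' : (acc ++ [c]).Pairwise (· < ·) := by
        rw [List.pairwise_append]
        exact ⟨hacc, List.pairwise_singleton _ _, by simpa using hlt⟩
      have hlast' : ∀ m, (acc ++ [c]).getLast? = some m → ∀ b ∈ t, m ≤ b := by
        intro m hm b hb
        rw [List.getLast?_concat] at hm
        cases hm; exact hs'.1 b hb
      obtain ⟨h1, h2⟩ := ih (acc ++ [c]) hs'.2 hacc' hlast'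
      refine ⟨h1, fun x => ?_⟩
      rw [h2 x]; simp [List.mem_append, or_assoc, or_comm, or_left_comm]
    · rw [if_neg hcond]
      rw [not_or, not_not] at hcond
      obtain ⟨hne, hm⟩ := hcond
      have hcmem : c ∈ acc := by
        have := List.mem_of_getLast? hm; simpa using this
      have hlast' : ∀ m, acc.getLast? = some m → ∀ b ∈ t, m ≤ b := by
        intro m h b hb
        rw [hm] at h; cases h; exact hs'.1 b hb
      obtain ⟨h1, h2⟩ := ih acc hs'.2 hacc hlast'
      refine ⟨h1, fun x => ?_⟩
      rw [h2 x]
      constructor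
      · rintro (h | h) <;> simp [h]
      · rintro (h | h)
        · exact Or.inl h
        · rcases List.mem_cons.mp h with rfl | h'
          · exact Or.inl hcmem
          · exact Or.inr h'

lemma B_spec (policy_terms : List String) :
    (normalize_policy_terms_alt policy_terms).Pairwise (· < ·)
    ∧ (∀ x, x ∈ normalize_policy_terms_alt policy_terms ↔ x ∈ pvCleanList policy_terms) := by
  unfold normalize_policy_terms_alt
  have hs : (PySem.List.sorted (pvCleanList policy_terms) (fun x => x) false).Pairwise (· ≤ ·) := by
    simpa using PySem.List.sorted_pairwise (pvCleanList policy_terms) (fun x => x)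
  obtain ⟨h1, h2⟩ := dedup_loop_spec (PySem.List.sorted (pvCleanList policy_terms) (fun x => x) false)
    [] hs (List.Pairwise.nil) (by intro m hm; cases hm)
  refine ⟨h1, fun x => ?_⟩
  rw [show ((policy_terms.map (fun t => PySem.Str.lower (PySem.Str.strip t))).filter (fun c => c ≠ ""))
        = pvCleanList policy_terms from rfl]
  rw [h2 x]
  simp [PySem.List.mem_sorted]

-- ===== VERDICT (by name: the statement is the Claim_ definition above) =====
theorem normalize_policy_terms_spec : Claim_equal_normalize_policy_terms := by
  intro policy_terms _
  unfold Spec_normalize_policy_terms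
  obtain ⟨hpw, hmem⟩ := B_spec policy_terms
  rw [A_eq_sorted_ofList]
  have hnd : (normalize_policy_terms_alt policy_terms).Nodup :=
    hpw.imp (fun h => ne_of_lt h)
  have hperm : (normalize_policy_terms_alt policy_terms).Perm (PySem.Set.ofList (pvCleanList policy_terms)) := by
    refine (List.perm_ext_iff_of_nodup hnd (PySem.Set.nodup_ofList _)).mpr ?_
    intro a
    rw [hmem a, PySem.Set.mem_ofList]
  exact PySem.List.sorted_eq_of_perm_of_pairwise_lt _ _ _ hperm hpw
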